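-- pv_equiv track=rewrite | github.com/rachelmetzgar/AI_mind_rep | exp_3/labels/code/analysis/probes/generate_alignment_figures.py | get_category
-- ===== SOURCE A (Python) =====
-- def get_category(dim_id, mode):
--     """Get category for a dimension ID."""
--     if mode == "contrast":
--         categories = {
--             "Mental":    [1, 2, 3, 4, 5, 6, 7, 17],
--             "Physical":  [8, 9, 10],
--             "Pragmatic": [11, 12, 13],
--             "Human vs AI (General)":  [0],
--             "Bio Ctrl":  [14],
--             "Shapes":    [15],
--             "SysPrompt": [18],
--         }
--     else:  # standalone
--         categories = {
--             "Mental":    [1, 2, 3, 4, 5, 6, 7, 18],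
--             "Physical":  [8, 9, 10],
--             "Pragmatic": [11, 12, 13],
--             "Bio Ctrl":  [14],
--             "Shapes":    [15],
--             "Entity":    [16, 17],
--             "SysPrompt": [20, 21, 22, 23],
--         }
--
--     for cat, ids in categories.items():
--         if dim_id in ids:
--             return cat
--     return "Other"
-- ===== SOURCE B (Python) =====
-- def get_category(dim_id, mode):
--     """Get category for a dimension ID."""
--     # Shared across both modes: closed-form range tests, no tables at all.
--     if 1 <= dim_id <= 7:
--         return "Mental"
--     if 8 <= dim_id <= 10:
--         return "Physical"
--     if 11 <= dim_id <= 13: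
--         return "Pragmatic"
--     if dim_id == 14:
--         return "Bio Ctrl"
--     if dim_id == 15:
--         return "Shapes"
--     if mode == "contrast":
--         if dim_id == 17:
--             return "Mental"
--         if dim_id == 0:
--             return "Human vs AI (General)"
--         if dim_id == 18:
--             return "SysPrompt"
--     else:
--         if dim_id == 18:
--             return "Mental"
--         if dim_id == 16 or dim_id == 17:
--             return "Entity"
--         if 20 <= dim_id <= 23:
--             return "SysPrompt"
--     return "Other"
-- ===== Notes on version B (the rewrite author's own statement) =====
-- stated objective: simpler
-- what changed: Replaces the per-call dict of id lists and the scan-with-membership loop by a closed-form chain of integer range/equality tests: shared ranges first, then the few mode-specific ids, with no tables or loops at all.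
import Mathlib
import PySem

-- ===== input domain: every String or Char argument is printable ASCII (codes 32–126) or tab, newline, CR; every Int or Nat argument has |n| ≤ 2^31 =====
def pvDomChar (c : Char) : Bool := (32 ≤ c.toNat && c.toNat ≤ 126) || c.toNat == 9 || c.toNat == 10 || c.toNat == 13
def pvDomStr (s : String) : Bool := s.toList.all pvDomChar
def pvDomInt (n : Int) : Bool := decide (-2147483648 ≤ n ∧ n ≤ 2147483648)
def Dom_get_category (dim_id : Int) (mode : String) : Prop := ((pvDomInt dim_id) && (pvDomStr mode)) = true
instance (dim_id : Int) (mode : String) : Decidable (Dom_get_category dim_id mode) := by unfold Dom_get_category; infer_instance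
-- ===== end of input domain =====

-- B replaces A's per-call table scan by a closed-form chain of integer range/equality
-- tests (mode-independent ranges first, then the mode-specific ids): 'simpler' objective.

-- ===== PORT A =====
def catsContrastA : List (String × List Int) :=
  [("Mental", [1, 2, 3, 4, 5, 6, 7, 17]),
   ("Physical", [8, 9, 10]),
   ("Pragmatic", [11, 12, 13]),
   ("Human vs AI (General)", [0]),
   ("Bio Ctrl", [14]),
   ("Shapes", [15]),
   ("SysPrompt", [18])]

def catsStandaloneA : List (String × List Int) :=
  [("Mental", [1, 2, 3, 4, 5, 6, 7, 18]),
   ("Physical", [8, 9, 10]),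
   ("Pragmatic", [11, 12, 13]),
   ("Bio Ctrl", [14]),
   ("Shapes", [15]),
   ("Entity", [16, 17]),
   ("SysPrompt", [20, 21, 22, 23])]

-- 'for cat, ids in categories.items(): if dim_id in ids: return cat' / 'return "Other"'
def scanCats (dim_id : Int) : List (String × List Int) → String
  | [] => "Other"
  | (cat, ids) :: rest => if ids.contains dim_id then cat else scanCats dim_id rest

def get_category (dim_id : Int) (mode : String) : String :=
  let categories := if mode == "contrast" then catsContrastA else catsStandaloneA
  scanCats dim_id categories

-- ===== PORT B =====
-- closed-form branch chain: shared ranges, then the mode-specific ids, else "Other"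
def get_category_alt (dim_id : Int) (mode : String) : String :=
  if 1 ≤ dim_id ∧ dim_id ≤ 7 then "Mental"
  else if 8 ≤ dim_id ∧ dim_id ≤ 10 then "Physical"
  else if 11 ≤ dim_id ∧ dim_id ≤ 13 then "Pragmatic"
  else if dim_id = 14 then "Bio Ctrl"
  else if dim_id = 15 then "Shapes"
  else if mode == "contrast" then
    if dim_id = 17 then "Mental"
    else if dim_id = 0 then "Human vs AI (General)"
    else if dim_id = 18 then "SysPrompt"
    else "Other"
  else
    if dim_id = 18 then "Mental"
    else if dim_id = 16 ∨ dim_id = 17 then "Entity"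
    else if 20 ≤ dim_id ∧ dim_id ≤ 23 then "SysPrompt"
    else "Other"

-- ===== PRECONDITION & SPEC =====
def Spec_get_category (dim_id : Int) (mode : String) (out : String) : Prop := out = get_category_alt dim_id mode
instance (dim_id : Int) (mode : String) (out : String) : Decidable (Spec_get_category dim_id mode out) := by unfold Spec_get_category; infer_instance

-- ===== CLAIM (what is proved, stated in full; the proofs are below) =====
def Claim_equal_get_category : Prop := ∀ (dim_id : Int) (mode : String), Dom_get_category dim_id mode → Spec_get_category dim_id mode (get_category dim_id mode)

-- ===== LEMMAS AND PROOFS =====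

lemma scanC_other (d : Int) (h : ¬ (0 ≤ d ∧ d ≤ 23)) : scanCats d catsContrastA = "Other" := by
  simp only [catsContrastA, scanCats]
  rw [if_neg (show ¬(([1, 2, 3, 4, 5, 6, 7, 17] : List Int).contains d = true) by simp; omega)]
  rw [if_neg (show ¬(([8, 9, 10] : List Int).contains d = true) by simp; omega)]
  rw [if_neg (show ¬(([11, 12, 13] : List Int).contains d = true) by simp; omega)]
  rw [if_neg (show ¬(([0] : List Int).contains d = true) by simp; omega)]
  rw [if_neg (show ¬(([14] : List Int).contains d = true) by simp; omega)]
  rw [if_neg (show ¬(([15] : List Int).contains d = true) by simp; omega)]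
  rw [if_neg (show ¬(([18] : List Int).contains d = true) by simp; omega)]

lemma scanS_other (d : Int) (h : ¬ (0 ≤ d ∧ d ≤ 23)) : scanCats d catsStandaloneA = "Other" := by
  simp only [catsStandaloneA, scanCats]
  rw [if_neg (show ¬(([1, 2, 3, 4, 5, 6, 7, 18] : List Int).contains d = true) by simp; omega)]
  rw [if_neg (show ¬(([8, 9, 10] : List Int).contains d = true) by simp; omega)]
  rw [if_neg (show ¬(([11, 12, 13] : List Int).contains d = true) by simp; omega)]
  rw [if_neg (show ¬(([14] : List Int).contains d = true) by simp; omega)]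
  rw [if_neg (show ¬(([15] : List Int).contains d = true) by simp; omega)]
  rw [if_neg (show ¬(([16, 17] : List Int).contains d = true) by simp; omega)]
  rw [if_neg (show ¬(([20, 21, 22, 23] : List Int).contains d = true) by simp; omega)]

lemma alt_other (d : Int) (mode : String) (h : ¬ (0 ≤ d ∧ d ≤ 23)) :
    get_category_alt d mode = "Other" := by
  unfold get_category_alt
  rw [if_neg (by omega), if_neg (by omega), if_neg (by omega), if_neg (by omega), if_neg (by omega)]
  by_cases hm : mode == "contrast" <;> simp only [hm, if_true, Bool.false_eq_true, if_false]
  · rw [if_neg (by omega), if_neg (by omega), if_neg (by omega)]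
  · rw [if_neg (by omega), if_neg (by omega), if_neg (by omega)]

lemma contrast_eq (d : Int) : scanCats d catsContrastA = get_category_alt d "contrast" := by
  by_cases h : 0 ≤ d ∧ d ≤ 23
  · obtain ⟨h1, h2⟩ := h
    interval_cases d <;> decide
  · rw [scanC_other d h, alt_other d _ h]

lemma standalone_eq (d : Int) (mode : String) (hm : ¬ (mode == "contrast") = true) :
    scanCats d catsStandaloneA = get_category_alt d mode := by
  by_cases h : 0 ≤ d ∧ d ≤ 23
  · obtain ⟨h1, h2⟩ := h
    unfold get_category_alt
    simp only [hm, Bool.false_eq_true, if_false]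
    interval_cases d <;> decide
  · rw [scanS_other d h, alt_other d _ h]

-- ===== VERDICT (by name: the statement is the Claim_ definition above) =====
theorem get_category_spec : Claim_equal_get_category := by
  intro d mode _
  unfold Spec_get_category get_category
  by_cases h : mode == "contrast"
  · simp only [h, if_true]
    rw [contrast_eq d]
    have : mode = "contrast" := by simpa using h
    rw [this]
  · simp only [h, Bool.false_eq_true, if_false]
    exact standalone_eq d mode h
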